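-- pv_equiv track=rewrite | github.com/Rohit909-creator/Simple_VQA | Preprocessing.py | create_unique_answers_dict
-- ===== SOURCE A (Python) =====
-- def create_unique_answers_dict(qa_pairs):
--     """
--     Create a dictionary mapping unique answers to unique indices.
--
--     Returns:
--         dict: A dictionary mapping answer text to a unique index
--     """
--     unique_answers = set()
--     for image_id, pairs in qa_pairs.items():
--         for _, answer in pairs:
--             # Split answers if they are comma-separated
--             if ',' in answer:
--                 for ans in answer.split(','):
--                     unique_answers.add(ans.strip())
--             else:
--                 unique_answers.add(answer)
--
--     # Create a mapping of answers to indices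
--     answer_to_idx = {ans: idx for idx, ans in enumerate(sorted(unique_answers))}
--
--     # Save this mapping for later use
--     return answer_to_idx
-- ===== SOURCE B (Python) =====
-- def create_unique_answers_dict(qa_pairs):
--     """
--     Create a dictionary mapping unique answers to unique indices.
--
--     Returns:
--         dict: A dictionary mapping answer text to a unique index
--     """
--     # Maintain a SORTED list of unique answers incrementally (online
--     # insertion with dedup) instead of building a set and sorting at the end.
--     sorted_unique = []
--
--     def insert_sorted(ans):
--         i = 0
--         while i < len(sorted_unique) and sorted_unique[i] < ans:
--             i += 1
--         if i == len(sorted_unique) or sorted_unique[i] != ans: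
--             sorted_unique.insert(i, ans)
--
--     for image_id, pairs in qa_pairs.items():
--         for _, answer in pairs:
--             if ',' in answer:
--                 for ans in answer.split(','):
--                     insert_sorted(ans.strip())
--             else:
--                 insert_sorted(answer)
--
--     # Assign sequential indices in one final walk over the sorted list
--     answer_to_idx = {}
--     for ans in sorted_unique:
--         answer_to_idx[ans] = len(answer_to_idx)
--     return answer_to_idx
-- ===== Notes on version B (the rewrite author's own statement) =====
-- stated objective: alternative
-- what changed: B never builds a set and never calls sorted(): it maintains a sorted duplicate-free list incrementally, inserting each answer piece at its linear-scan position (skipping it if already present), then assigns indices in one walk over that list; A builds a set first and sorts it afterwards.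
import Mathlib
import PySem

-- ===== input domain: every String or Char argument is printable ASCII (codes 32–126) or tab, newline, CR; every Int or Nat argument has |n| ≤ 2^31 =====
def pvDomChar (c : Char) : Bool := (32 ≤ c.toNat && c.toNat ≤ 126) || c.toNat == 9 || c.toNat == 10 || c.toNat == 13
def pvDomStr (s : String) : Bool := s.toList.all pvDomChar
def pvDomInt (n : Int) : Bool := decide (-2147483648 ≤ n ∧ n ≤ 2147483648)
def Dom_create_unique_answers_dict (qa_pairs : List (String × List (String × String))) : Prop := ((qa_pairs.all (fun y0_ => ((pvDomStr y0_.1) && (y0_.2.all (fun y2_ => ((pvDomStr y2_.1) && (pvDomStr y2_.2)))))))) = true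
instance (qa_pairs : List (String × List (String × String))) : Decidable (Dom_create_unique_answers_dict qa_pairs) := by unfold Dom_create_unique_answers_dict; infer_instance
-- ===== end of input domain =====

-- B maintains a sorted duplicate-free list by online linear-scan insertion (no set, no sort
-- call) and assigns indices by dict size in one final walk; objective: alternative algorithm.

-- ===== PORT A =====
def create_unique_answers_dict (qa_pairs : List (String × List (String × String))) : List (String × Int) :=
  let unique_answers : PySem.Set String :=
    qa_pairs.foldl (fun ua p =>
      p.2.foldl (fun ua qa =>
        if PySem.Str.isIn "," qa.2 then
          ((PySem.Str.split? qa.2 ",").getD []).foldl (fun ua ans => PySem.Set.add ua (PySem.Str.strip ans)) ua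
        else
          PySem.Set.add ua qa.2) ua) PySem.Set.empty
  let answer_to_idx : PySem.Dict String Int :=
    (PySem.List.enumerate (PySem.List.sorted unique_answers (fun x => x) false) 0).foldl
      (fun d p => d.insert p.2 p.1) PySem.Dict.empty
  answer_to_idx.items

-- ===== PORT B =====
-- insert_sorted: the linear scan 'while sorted_unique[i] < ans' then insert-unless-equal,
-- as the obvious structural recursion over the list
def pvInsertSorted (a : String) : List String → List String
  | [] => [a]
  | b :: t =>
    if b < a then b :: pvInsertSorted a t
    else if b ≠ a then a :: b :: t
    else b :: t

def create_unique_answers_dict_alt (qa_pairs : List (String × List (String × String))) : List (String × Int) :=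
  let sorted_unique : List String :=
    qa_pairs.foldl (fun l p =>
      p.2.foldl (fun l qa =>
        if PySem.Str.isIn "," qa.2 then
          ((PySem.Str.split? qa.2 ",").getD []).foldl (fun l ans => pvInsertSorted (PySem.Str.strip ans) l) l
        else
          pvInsertSorted qa.2 l) l) []
  let answer_to_idx : PySem.Dict String Int :=
    sorted_unique.foldl (fun d ans => d.insert ans (d.size : Int)) PySem.Dict.empty
  answer_to_idx.items

-- ===== PRECONDITION & SPEC =====
def Spec_create_unique_answers_dict (qa_pairs : List (String × List (String × String))) (out : List (String × Int)) : Prop := out = create_unique_answers_dict_alt qa_pairs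
instance (qa_pairs : List (String × List (String × String))) (out : List (String × Int)) : Decidable (Spec_create_unique_answers_dict qa_pairs out) := by unfold Spec_create_unique_answers_dict; infer_instance

-- ===== CLAIM (what is proved, stated in full; the proofs are below) =====
def Claim_equal_create_unique_answers_dict : Prop := ∀ (qa_pairs : List (String × List (String × String))), Dom_create_unique_answers_dict qa_pairs → Spec_create_unique_answers_dict qa_pairs (create_unique_answers_dict qa_pairs)

-- ===== LEMMAS AND PROOFS =====

-- the pieces one answer contributes (proof-side refactoring of the shared if/else branch)
def pvPieces (a : String) : List String :=
  if PySem.Str.isIn "," a then ((PySem.Str.split? a ",").getD []).map PySem.Str.strip else [a]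

def pvAll (qa_pairs : List (String × List (String × String))) : List String :=
  qa_pairs.flatMap (fun p => p.2.flatMap (fun q => pvPieces q.2))

-- folding over a flattened list is the nested fold
lemma pvFoldlFlatMap {α β γ : Type} (g : α → List β) (f : γ → β → γ) (l : List α) :
    ∀ (i : γ), (l.flatMap g).foldl f i = l.foldl (fun a x => (g x).foldl f a) i := by
  induction l with
  | nil => intro i; simp
  | cons a t ih => intro i; simp [List.foldl_append, ih]

-- any per-piece step: the double collection loop is one fold over the flattened piece list
lemma pvCollectGen {γ : Type} (f : γ → String → γ) (qa_pairs : List (String × List (String × String))) (i : γ) :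
    qa_pairs.foldl (fun s p => p.2.foldl (fun s q => (pvPieces q.2).foldl f s) s) i
      = (pvAll qa_pairs).foldl f i := by
  rw [pvAll, pvFoldlFlatMap]
  congr 1
  funext a x
  rw [pvFoldlFlatMap]

-- A's and B's inner per-answer steps, rewritten through pvPieces
lemma pvInnerA_fun :
    (fun (ua : PySem.Set String) (qa : String × String) =>
      if PySem.Str.isIn "," qa.2 then
        ((PySem.Str.split? qa.2 ",").getD []).foldl (fun ua ans => PySem.Set.add ua (PySem.Str.strip ans)) ua
      else PySem.Set.add ua qa.2)
    = fun ua qa => (pvPieces qa.2).foldl PySem.Set.add ua := by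
  funext ua qa
  unfold pvPieces
  split
  · rw [List.foldl_map]
  · simp

lemma pvInnerB_fun :
    (fun (l : List String) (qa : String × String) =>
      if PySem.Str.isIn "," qa.2 then
        ((PySem.Str.split? qa.2 ",").getD []).foldl (fun l ans => pvInsertSorted (PySem.Str.strip ans) l) l
      else pvInsertSorted qa.2 l)
    = fun l qa => (pvPieces qa.2).foldl (fun l a => pvInsertSorted a l) l := by
  funext l qa
  unfold pvPieces
  split
  · rw [List.foldl_map]
  · simp

-- pvInsertSorted adds a to the carried set of elements …
lemma pvInsertSorted_mem (a x : String) (l : List String) :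
    x ∈ pvInsertSorted a l ↔ x = a ∨ x ∈ l := by
  induction l with
  | nil => simp [pvInsertSorted]
  | cons b t ih =>
    by_cases hba : b < a
    · simp only [pvInsertSorted, if_pos hba, List.mem_cons, ih]
      tauto
    · by_cases hne : b ≠ a
      · simp only [pvInsertSorted, if_neg hba, if_pos hne, List.mem_cons]
      · have hba' : b = a := not_not.mp hne
        subst hba'
        simp only [pvInsertSorted, if_neg hba, if_neg hne, List.mem_cons]
        tauto

-- … and keeps the list strictly increasing
lemma pvInsertSorted_pairwise (a : String) (l : List String) (h : l.Pairwise (· < ·)) :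
    (pvInsertSorted a l).Pairwise (· < ·) := by
  induction l with
  | nil => simp [pvInsertSorted]
  | cons b t ih =>
    rcases List.pairwise_cons.mp h with ⟨hb, ht⟩
    by_cases hba : b < a
    · rw [pvInsertSorted, if_pos hba]
      refine List.pairwise_cons.mpr ⟨?_, ih ht⟩
      intro x hx
      rcases (pvInsertSorted_mem a x t).mp hx with rfl | hxt
      · exact hba
      · exact hb x hxt
    · by_cases hne : b ≠ a
      · rw [pvInsertSorted, if_neg hba, if_pos hne]
        have hab : a < b := lt_of_le_of_ne (not_lt.mp hba) (Ne.symm hne)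
        refine List.pairwise_cons.mpr ⟨?_, h⟩
        intro x hx
        rcases List.mem_cons.mp hx with rfl | hxt
        · exact hab
        · exact lt_trans hab (hb x hxt)
      · rw [pvInsertSorted, if_neg hba, if_neg hne]
        exact h

-- folding pvInsertSorted over the whole piece list: membership and order
lemma pvInsertFold_mem (M : List String) : ∀ (l : List String) (x : String),
    x ∈ M.foldl (fun l a => pvInsertSorted a l) l ↔ x ∈ l ∨ x ∈ M := by
  induction M with
  | nil => intro l x; simp
  | cons a t ih =>
    intro l x
    simp only [List.foldl_cons, ih, pvInsertSorted_mem, List.mem_cons]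
    tauto

lemma pvInsertFold_pairwise (M : List String) : ∀ (l : List String),
    l.Pairwise (· < ·) → (M.foldl (fun l a => pvInsertSorted a l) l).Pairwise (· < ·) := by
  induction M with
  | nil => intro l hl; simpa using hl
  | cons a t ih =>
    intro l hl
    exact ih _ (pvInsertSorted_pairwise a l hl)

-- B's sorted_unique IS sorted(set(all pieces)): same elements, strictly increasing
lemma pvSortedUniqueEq (L : List String) :
    PySem.List.sorted (PySem.Set.ofList L) (fun x => x) false
      = L.foldl (fun l a => pvInsertSorted a l) [] := by
  apply PySem.List.sorted_eq_of_perm_of_pairwise_lt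
  · have hnd : (L.foldl (fun l a => pvInsertSorted a l) []).Nodup :=
      (pvInsertFold_pairwise L [] (by simp)).nodup
    rw [List.perm_ext_iff_of_nodup hnd (PySem.Set.nodup_ofList L)]
    intro x
    rw [pvInsertFold_mem, PySem.Set.mem_ofList]
    simp
  · exact pvInsertFold_pairwise L [] (by simp)

-- A's enumerate-insert loop over fresh distinct keys appends the swapped pairs
lemma pvFoldA (T : List String) (hT : T.Nodup) :
    (((PySem.List.enumerate T 0).foldl (fun d p => d.insert p.2 p.1) (PySem.Dict.empty : PySem.Dict String Int)).items)
      = (PySem.List.enumerate T 0).map (fun p => (p.2, p.1)) := by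
  have := PySem.Dict.items_foldl_insert_fresh (PySem.List.enumerate T 0)
    (fun p => p.2) (fun p => p.1) (PySem.Dict.empty : PySem.Dict String Int)
    (fun a _ => by simp [PySem.Dict.contains_empty])
    (by rw [PySem.List.map_snd_enumerate]; exact hT)
  simpa [PySem.Dict.empty] using this

-- B's size-indexed dict loop over a duplicate-free list appends the same pairs
lemma pvFoldB (T : List String) (hnd : T.Nodup) : ∀ (d : PySem.Dict String Int), (∀ a ∈ T, d.contains a = false) →
    ((T.foldl (fun d ans => d.insert ans (d.size : Int)) d).items)
      = d.items ++ (PySem.List.enumerate T (d.size : Int)).map (fun p => (p.2, p.1)) := by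
  induction T with
  | nil => intro d _; simp [PySem.List.enumerate_nil]
  | cons a t ih =>
    intro d hfresh
    have hc : d.contains a = false := hfresh a (by simp)
    have hitems := PySem.Dict.items_insert_of_not_contains d ((d.size : Int)) hc
    have hkeys := PySem.Dict.keys_insert_of_not_contains d ((d.size : Int)) hc
    have hsize : (d.insert a (d.size : Int)).size = d.size + 1 := by
      rw [PySem.Dict.size_insert, if_neg (by simp [hc])]
    have hfresh' : ∀ x ∈ t, (d.insert a (d.size : Int)).contains x = false := by
      intro x hx
      have hxa : x ≠ a := fun h => (List.nodup_cons.mp hnd).1 (h ▸ hx)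
      have hxk : x ∉ d.keys := fun h => by
        have := (PySem.Dict.contains_iff_mem_keys d x).mpr h
        rw [hfresh x (List.mem_cons_of_mem a hx)] at this
        exact Bool.false_ne_true this
      cases hcc : (d.insert a (d.size : Int)).contains x with
      | false => rfl
      | true =>
        have := (PySem.Dict.contains_iff_mem_keys _ x).mp hcc
        rw [hkeys] at this
        rcases List.mem_append.mp this with h | h
        · exact absurd h hxk
        · exact absurd (List.mem_singleton.mp h) hxa
    simp only [List.foldl_cons]
    rw [ih (List.nodup_cons.mp hnd).2 _ hfresh', hitems, hsize, PySem.List.enumerate_cons]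
    simp [List.append_assoc]

-- ===== VERDICT (by name: the statement is the Claim_ definition above) =====
theorem create_unique_answers_dict_spec : Claim_equal_create_unique_answers_dict := by
  intro qa_pairs _
  show create_unique_answers_dict qa_pairs = create_unique_answers_dict_alt qa_pairs
  simp only [create_unique_answers_dict, create_unique_answers_dict_alt]
  rw [pvInnerA_fun, pvInnerB_fun, pvCollectGen, pvCollectGen,
    show (PySem.Set.empty : PySem.Set String) = [] from rfl,
    ← PySem.Set.ofList_eq_foldl, ← pvSortedUniqueEq (pvAll qa_pairs)]
  have hT : (PySem.List.sorted (PySem.Set.ofList (pvAll qa_pairs)) (fun x => x) false).Nodup :=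
    (PySem.List.sorted_perm _ (fun x => x) false).nodup_iff.mpr (PySem.Set.nodup_ofList _)
  rw [pvFoldA _ hT, pvFoldB _ hT PySem.Dict.empty (fun a _ => PySem.Dict.contains_empty a)]
  simp [PySem.Dict.empty]
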